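-- pv_equiv track=rewrite | github.com/Gotsmy/snek | snek/elements.py | unique_elements
-- ===== SOURCE A (Python) =====
-- def unique_elements(formula):
--     '''
--     Get a list of unique elements from a chemical formula.
--
--     Parameters
--     ----------
--         formula   : Str
--                     Chemical formula, e.g. ``'H2O'``.
--
--     Returns
--     -------
--         list_elements :  List
--                          List of unique elements, e.g. ``['H','O']``.
--     '''
--
--     list_elements = []
--
--     tmp = ''
--     for letter in formula:
--         if not letter.isnumeric() and not letter == '.':
--             if letter.isupper():
--                 if len(tmp) > 0 and tmp not in list_elements:
--                     list_elements.append(tmp)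
--                 tmp = ''
--                 tmp += letter
--             else:
--                 tmp += letter
--
--     if len(tmp) > 0 and tmp not in list_elements:
--         list_elements.append(tmp)
--
--     return list_elements
-- ===== SOURCE B (Python) =====
-- def unique_elements(formula):
--     cleaned = ''.join(c for c in formula if not c.isnumeric() and c != '.')
--     bounds = [i for i, c in enumerate(cleaned) if c.isupper() and i > 0]
--     starts = [0] + bounds if cleaned else []
--     ends = bounds + [len(cleaned)] if cleaned else []
--     tokens = [cleaned[s:e] for s, e in zip(starts, ends)]
--     return list(dict.fromkeys(tokens))
-- ===== Notes on version B (the rewrite author's own statement) =====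
-- stated objective: alternative
-- what changed: B first filters out digits and dots, then tokenizes the cleaned string by computing the uppercase boundary indices and slicing between consecutive boundaries, and finally deduplicates once at the end with dict.fromkeys, instead of A's single accumulate-onto-a-running-string loop with an interleaved membership-test dedup.
import Mathlib
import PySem

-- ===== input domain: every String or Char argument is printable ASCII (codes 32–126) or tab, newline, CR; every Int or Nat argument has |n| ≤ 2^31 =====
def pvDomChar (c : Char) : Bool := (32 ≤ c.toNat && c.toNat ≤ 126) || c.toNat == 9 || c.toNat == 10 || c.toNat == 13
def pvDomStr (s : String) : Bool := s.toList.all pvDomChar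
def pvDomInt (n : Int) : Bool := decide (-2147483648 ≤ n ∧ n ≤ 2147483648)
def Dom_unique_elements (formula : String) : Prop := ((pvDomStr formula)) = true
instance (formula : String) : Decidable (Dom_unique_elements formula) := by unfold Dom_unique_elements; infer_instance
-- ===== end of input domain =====

-- B tokenizes the cleaned formula by uppercase boundary indices and slicing, then dedups once at
-- the end, instead of A's accumulate-onto-a-running-string loop with interleaved dedup (alternative
-- decomposition, same cost). Python's `c.isnumeric()` is ported as PySem.Chars.isdigit: the two
-- Python predicates coincide on the printable-ASCII domain Dom_unique_elements.

-- ===== PORT A =====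
-- the loop's outer test: `if not letter.isnumeric() and not letter == '.'`
def uaKeep (c : Char) : Bool := !(PySem.Chars.isdigit c) && !(c == '.')

-- the loop body inside that test; state = (list_elements, tmp)
def uaInner (st : List String × List Char) (letter : Char) : List String × List Char :=
  if PySem.Chars.isupper letter then
    (if decide (0 < st.2.length) && !(st.1.contains (String.ofList st.2)) then
        st.1 ++ [String.ofList st.2]
      else st.1,
     [letter])
  else
    (st.1, st.2 ++ [letter])

def unique_elements (formula : String) : List String :=
  let r := formula.toList.foldl (fun st letter => if uaKeep letter then uaInner st letter else st) ([], [])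
  if decide (0 < r.2.length) && !(r.1.contains (String.ofList r.2)) then r.1 ++ [String.ofList r.2] else r.1

-- ===== PORT B =====
def unique_elements_alt (formula : String) : List String :=
  let cleaned : List Char := formula.toList.filter (fun c => !(PySem.Chars.isdigit c) && !(c == '.'))
  let bounds : List Int :=
    ((PySem.List.enumerate cleaned 0).filter
        (fun p => PySem.Chars.isupper p.2 && decide ((0 : Int) < p.1))).map (fun p => p.1)
  let starts : List Int := if cleaned = [] then [] else 0 :: bounds
  let ends : List Int := if cleaned = [] then [] else bounds ++ [(cleaned.length : Int)]
  let tokens : List String :=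
    (starts.zip ends).map (fun p => String.ofList (PySem.List.slice cleaned (some p.1) (some p.2)))
  PySem.List.dedup tokens

-- ===== PRECONDITION & SPEC =====
def Spec_unique_elements (formula : String) (out : List String) : Prop := out = unique_elements_alt formula
instance (formula : String) (out : List String) : Decidable (Spec_unique_elements formula out) := by unfold Spec_unique_elements; infer_instance

-- ===== CLAIM (what is proved, stated in full; the proofs are below) =====
def Claim_equal_unique_elements : Prop := ∀ (formula : String), Dom_unique_elements formula → Spec_unique_elements formula (unique_elements formula)

-- ===== LEMMAS AND PROOFS =====

-- `q c` : c does not start a new token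
def q (c : Char) : Bool := !(PySem.Chars.isupper c)

-- the common tokenization both programs compute: first token = head plus the following
-- non-uppercase run, then recurse on the rest
def chunks : List Char → List (List Char)
  | [] => []
  | c :: cs => (c :: cs.takeWhile q) :: chunks (cs.dropWhile q)
  termination_by l => l.length
  decreasing_by simpa using Nat.lt_succ_of_le (List.length_dropWhile_le q cs)

-- A's trailing flush
def flushA (st : List String × List Char) : List String :=
  if decide (0 < st.2.length) && !(st.1.contains (String.ofList st.2)) then st.1 ++ [String.ofList st.2] else st.1

lemma flushA_ne (acc : List String) (tmp : List Char) (h : tmp ≠ []) :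
    flushA (acc, tmp) = PySem.Set.add acc (String.ofList tmp) := by
  have : 0 < tmp.length := List.length_pos_iff.mpr h
  by_cases hc : acc.contains (String.ofList tmp) <;>
    simp [flushA, PySem.Set.add, this, PySem.Set.contains]

lemma A_main : ∀ (cs : List Char) (acc : List String) (tmp : List Char), tmp ≠ [] →
    flushA (cs.foldl uaInner (acc, tmp))
      = (((tmp ++ cs.takeWhile q) :: chunks (cs.dropWhile q)).map String.ofList).foldl PySem.Set.add acc := by
  intro cs
  induction cs with
  | nil =>
    intro acc tmp h
    simpa [chunks] using flushA_ne acc tmp h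
  | cons c cs ih =>
    intro acc tmp h
    by_cases hu : PySem.Chars.isupper c
    · have hstep : uaInner (acc, tmp) c = (PySem.Set.add acc (String.ofList tmp), [c]) := by
        have : 0 < tmp.length := List.length_pos_iff.mpr h
        by_cases hc : acc.contains (String.ofList tmp) <;>
          simp [uaInner, hu, PySem.Set.add, this, PySem.Set.contains]
      have hq : q c = false := by simp [q, hu]
      calc flushA ((c :: cs).foldl uaInner (acc, tmp))
          = flushA (cs.foldl uaInner (PySem.Set.add acc (String.ofList tmp), [c])) := by
            simp [List.foldl_cons, hstep]
        _ = (((([c] : List Char) ++ cs.takeWhile q) :: chunks (cs.dropWhile q)).map String.ofList).foldl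
              PySem.Set.add (PySem.Set.add acc (String.ofList tmp)) := ih _ [c] (by simp)
        _ = _ := by
            rw [show ((c :: cs).takeWhile q) = [] from by simp [hq],
                show ((c :: cs).dropWhile q) = c :: cs from by simp [hq]]
            rw [chunks]
            simp
    · have hq : q c = true := by simp [q, hu]
      have hstep : uaInner (acc, tmp) c = (acc, tmp ++ [c]) := by simp [uaInner, hu]
      calc flushA ((c :: cs).foldl uaInner (acc, tmp))
          = flushA (cs.foldl uaInner (acc, tmp ++ [c])) := by simp [List.foldl_cons, hstep]
        _ = ((((tmp ++ [c]) ++ cs.takeWhile q) :: chunks (cs.dropWhile q)).map String.ofList).foldl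
              PySem.Set.add acc := ih _ (tmp ++ [c]) (by simp)
        _ = _ := by
            rw [show ((c :: cs).takeWhile q) = c :: cs.takeWhile q from by simp [hq],
                show ((c :: cs).dropWhile q) = cs.dropWhile q from by simp [hq]]
            simp

lemma A_whole (l : List Char) :
    flushA (l.foldl uaInner ([], [])) = ((chunks l).map String.ofList).foldl PySem.Set.add [] := by
  cases l with
  | nil => simp [flushA, chunks]
  | cons c cs =>
    have hstep : uaInner ([], []) c = ([], [c]) := by
      by_cases hu : PySem.Chars.isupper c <;> simp [uaInner, hu]
    rw [List.foldl_cons, hstep, A_main cs [] [c] (by simp), chunks]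
    simp

-- indices (from 0) of the uppercase characters
def UpIdx : List Char → List Nat
  | [] => []
  | c :: cs => (if PySem.Chars.isupper c then [0] else []) ++ (UpIdx cs).map (· + 1)

lemma enum_filter : ∀ (l : List Char) (s : Nat),
    ((PySem.List.enumerate l ((s : Int) + 1)).filter
        (fun p => PySem.Chars.isupper p.2 && decide ((0 : Int) < p.1))).map (fun p => p.1)
      = (UpIdx l).map (fun n => ((n + s + 1 : Nat) : Int)) := by
  intro l
  induction l with
  | nil => intro s; simp [PySem.List.enumerate, UpIdx]
  | cons c cs ih =>
    intro s
    rw [PySem.List.enumerate_cons, UpIdx]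
    have hcast : ((s : Int) + 1) + 1 = ((s + 1 : Nat) : Int) + 1 := by push_cast; ring
    have htail :
        ((PySem.List.enumerate cs ((s : Int) + 1 + 1)).filter
            (fun p => PySem.Chars.isupper p.2 && decide ((0 : Int) < p.1))).map (fun p => p.1)
          = ((UpIdx cs).map (· + 1)).map (fun n => ((n + s + 1 : Nat) : Int)) := by
      rw [hcast, ih (s + 1), List.map_map]
      apply List.map_congr_left
      intro n _
      simp only [Function.comp_apply]
      congr 1
      omega
    by_cases hu : PySem.Chars.isupper c
    · have hpos : (decide ((0 : Int) < (s : Int) + 1)) = true := by simp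
      simp only [List.filter_cons, hu, hpos, Bool.and_self, if_true, List.map_cons, List.map_append]
      rw [htail]
      simp
    · simp only [List.filter_cons, hu, Bool.false_and, Bool.false_eq_true, if_false,
        List.nil_append]
      exact htail

-- B's token list, with Nat boundaries
def sliceT (l : List Char) (B : List Nat) : List (List Char) :=
  ((0 :: B).zip (B ++ [l.length])).map (fun p => (l.drop p.1).take (p.2 - p.1))

lemma UpIdx_append : ∀ (t r : List Char), UpIdx (t ++ r) = UpIdx t ++ (UpIdx r).map (· + t.length) := by
  intro t
  induction t with
  | nil => intro r; simp [UpIdx]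
  | cons c t ih =>
    intro r
    rw [List.cons_append, UpIdx, ih, UpIdx]
    simp only [List.map_append, List.map_map, List.append_assoc, List.length_cons]
    congr 2

lemma UpIdx_nil_of_no_upper : ∀ (t : List Char), (∀ x ∈ t, q x = true) → UpIdx t = [] := by
  intro t
  induction t with
  | nil => intro _; rfl
  | cons c t ih =>
    intro h
    have hc : PySem.Chars.isupper c = false := by
      have := h c (by simp)
      simpa [q] using this
    rw [UpIdx, ih (fun x hx => h x (by simp [hx])), hc]
    simp

lemma dropWhile_head_false (p : Char → Bool) : ∀ (l : List Char) (u : Char) (r : List Char),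
    l.dropWhile p = u :: r → p u = false := by
  intro l
  induction l with
  | nil => intro u r h; simp [List.dropWhile] at h
  | cons c cs ih =>
    intro u r h
    by_cases hc : p c
    · rw [List.dropWhile_cons, if_pos hc] at h; exact ih _ _ h
    · rw [List.dropWhile_cons, if_neg hc] at h; cases h; simpa using hc

-- shift lemma for sliceT over a prefix of length k
lemma sliceT_shift (pre r : List Char) (B : List Nat) :
    ((pre.length :: B.map (· + pre.length)).zip (B.map (· + pre.length) ++ [(pre ++ r).length])).map
        (fun p => ((pre ++ r).drop p.1).take (p.2 - p.1))
      = sliceT r B := by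
  have h1 : (pre.length :: B.map (· + pre.length)) = (0 :: B).map (· + pre.length) := by simp
  have h2 : (B.map (· + pre.length) ++ [(pre ++ r).length]) = (B ++ [r.length]).map (· + pre.length) := by
    simp [List.length_append]; omega
  rw [h1, h2, List.zip_map, sliceT, List.map_map]
  apply List.map_congr_left
  intro p _
  simp only [Function.comp_apply, Prod.map]
  have e1 : pre.drop (p.1 + pre.length) = [] := by
    apply List.drop_eq_nil_of_le; omega
  have e2 : p.1 + pre.length - pre.length = p.1 := by omega
  rw [List.drop_append, e1, e2, List.nil_append]
  congr 1
  omega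

lemma B_main : ∀ (n : Nat) (cs : List Char) (c : Char), cs.length ≤ n →
    sliceT (c :: cs) ((UpIdx cs).map (· + 1)) = chunks (c :: cs) := by
  intro n
  induction n with
  | zero =>
    intro cs c h
    have : cs = [] := List.eq_nil_of_length_eq_zero (Nat.le_zero.mp h)
    subst this
    simp [sliceT, UpIdx, chunks]
  | succ n ih =>
    intro cs c h
    have hsplit : cs = cs.takeWhile q ++ cs.dropWhile q := (List.takeWhile_append_dropWhile).symm
    have hUp : UpIdx cs = (UpIdx (cs.dropWhile q)).map (· + (cs.takeWhile q).length) := by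
      conv_lhs => rw [hsplit]
      rw [UpIdx_append, UpIdx_nil_of_no_upper _ (fun x hx => List.mem_takeWhile_imp hx)]
      simp
    cases hr : cs.dropWhile q with
    | nil =>
      have hcs : cs = cs.takeWhile q := by conv_lhs => rw [hsplit]; rw [hr]; simp
      rw [hUp, hr]
      rw [chunks, hr]
      simp only [UpIdx, List.map_nil, chunks]
      simp [sliceT, ← hcs]
    | cons u r' =>
      have hu : PySem.Chars.isupper u = true := by
        have := dropWhile_head_false q cs u r' hr
        simpa [q] using this
      have hUpr : UpIdx (u :: r') = 0 :: (UpIdx r').map (· + 1) := by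
        simp [UpIdx, hu]
      -- the boundary list of cs
      have hB : (UpIdx cs).map (· + 1)
          = ((cs.takeWhile q).length + 1) :: ((UpIdx r').map (· + 1)).map (· + ((cs.takeWhile q).length + 1)) := by
        rw [hUp, hr, hUpr]
        simp only [List.map_cons, List.map_map]
        congr 1
        omega
      have hlen : r'.length ≤ n := by
        have h1 : cs.length = (cs.takeWhile q).length + (u :: r').length := by
          conv_lhs => rw [hsplit]; rw [hr]
          simp [List.length_append]
        simp at h1; omega
      have hpre : (c :: cs) = (c :: cs.takeWhile q) ++ (u :: r') := by
        rw [List.cons_append, ← hr, ← hsplit]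
      -- unfold sliceT on the cons boundary list
      rw [chunks, hr, ← ih r' u hlen, hB, sliceT]
      simp only [List.cons_append, List.zip_cons_cons, List.map_cons]
      congr 1
      · -- first token is c followed by the non-uppercase run
        simp only [List.drop_zero, Nat.sub_zero]
        rw [hpre]
        exact List.take_left' (by simp)
      · -- remaining tokens are the tokens of the tail, shifted by the prefix length
        rw [hpre]
        have := sliceT_shift (c :: cs.takeWhile q) (u :: r') ((UpIdx r').map (· + 1))
        simpa using this

lemma B_tokens (l : List Char) :
    PySem.List.dedup
      (((if l = [] then ([] : List Int)
            else 0 :: ((PySem.List.enumerate l 0).filter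
                (fun p => PySem.Chars.isupper p.2 && decide ((0 : Int) < p.1))).map (fun p => p.1)).zip
          (if l = [] then []
            else ((PySem.List.enumerate l 0).filter
                (fun p => PySem.Chars.isupper p.2 && decide ((0 : Int) < p.1))).map (fun p => p.1)
              ++ [(l.length : Int)])).map
        (fun p => String.ofList (PySem.List.slice l (some p.1) (some p.2))))
      = PySem.List.dedup ((chunks l).map String.ofList) := by
  congr 1
  cases l with
  | nil => simp [chunks]
  | cons c cs =>
    have hb : ((PySem.List.enumerate (c :: cs) 0).filter
          (fun p => PySem.Chars.isupper p.2 && decide ((0 : Int) < p.1))).map (fun p => p.1)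
        = ((UpIdx cs).map (· + 1)).map (fun n : Nat => (n : Int)) := by
      rw [PySem.List.enumerate_cons, List.filter_cons]
      have h0 : (decide ((0 : Int) < 0)) = false := by decide
      have h1 : (0 : Int) + 1 = ((0 : Nat) : Int) + 1 := by norm_num
      rw [h0, Bool.and_false, if_neg (by simp), h1, enum_filter cs 0, List.map_map]
      apply List.map_congr_left
      intro n _
      simp only [Function.comp_apply]
    have hne : (c :: cs) ≠ [] := by simp
    rw [if_neg hne, if_neg hne, hb]
    have hstarts : ((0 : Int) :: ((UpIdx cs).map (· + 1)).map (fun n : Nat => (n : Int)))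
        = ((0 :: (UpIdx cs).map (· + 1)).map (fun n : Nat => (n : Int))) := by simp
    have hends : (((UpIdx cs).map (· + 1)).map (fun n : Nat => (n : Int)) ++ [((c :: cs).length : Int)])
        = (((UpIdx cs).map (· + 1) ++ [(c :: cs).length]).map (fun n : Nat => (n : Int))) := by simp
    rw [hstarts, hends, List.zip_map, List.map_map, ← B_main cs.length cs c (le_refl _), sliceT,
      List.map_map]
    apply List.map_congr_left
    intro p _
    simp only [Function.comp_apply, Prod.map]
    rw [PySem.List.slice_natCast]

lemma B_whole (formula : String) :
    unique_elements_alt formula = PySem.List.dedup ((chunks (formula.toList.filter uaKeep)).map String.ofList) := by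
  exact B_tokens (formula.toList.filter uaKeep)

-- ===== VERDICT (by name: the statement is the Claim_ definition above) =====
theorem unique_elements_spec : Claim_equal_unique_elements := by
  unfold Claim_equal_unique_elements Spec_unique_elements
  intro formula _
  have hA : unique_elements formula
      = ((chunks (formula.toList.filter uaKeep)).map String.ofList).foldl PySem.Set.add [] := by
    show flushA (formula.toList.foldl (fun st letter => if uaKeep letter then uaInner st letter else st) ([], [])) = _
    rw [PySem.List.foldl_if_eq_foldl_filter]
    exact A_whole _
  rw [hA, B_whole]
  rw [PySem.List.dedup_eq_ofList, PySem.Set.ofList_eq_foldl]
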